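-- pv_equiv track=rewrite | github.com/LANJr4D/FRED | fred-pyfred-2.3.0/pyfred/dnssec.py | countKeyTag
-- ===== SOURCE A (Python) =====
-- def countKeyTag(flags, protocol, alg, key):
--     """
--     Count keytag from RRDATA od DNSKEY RR according to appendix B of RFC 4034
--     """
--     if alg == 1:
--         if (len(key) < 4):
--             return 0;
--         else:
--             return (ord(key[len(key)-4]) << 8) + ord(key[len(key)-3])
--     else :
--         sum = flags + (protocol<< 8) + alg
--         for i in range(0,len(key)):
--             if (i & 1):
--                 sum += ord(key[i])
--             else:
--                 sum += ord(key[i]) << 8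
--         sum += (sum >> 16) & 0xFFFF
--         return sum & 0xFFFF
-- ===== SOURCE B (Python) =====
-- def countKeyTag(flags, protocol, alg, key):
--     """
--     Count keytag from RRDATA of DNSKEY RR according to appendix B of RFC 4034
--     """
--     if alg == 1:
--         return 0 if len(key) < 4 else (ord(key[len(key)-4]) << 8) + ord(key[len(key)-3])
--     total = flags + (protocol << 8) + alg
--     rest = key
--     while rest:
--         word = ord(rest[0]) << 8
--         if len(rest) > 1:
--             word += ord(rest[1])
--         total += word
--         rest = rest[2:]
--     total += (total >> 16) & 0xFFFF
--     return total & 0xFFFF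
-- ===== Notes on version B (the rewrite author's own statement) =====
-- stated objective: alternative
-- what changed: Replaces A's per-index loop that tests i&1 to decide high/low byte by the canonical RFC 4034 word-pair checksum: consume the key two bytes at a time building a 16-bit word (high byte shifted, low byte added when present), with the odd tail handled explicitly; the alg==1 branch is kept verbatim.
import Mathlib
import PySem

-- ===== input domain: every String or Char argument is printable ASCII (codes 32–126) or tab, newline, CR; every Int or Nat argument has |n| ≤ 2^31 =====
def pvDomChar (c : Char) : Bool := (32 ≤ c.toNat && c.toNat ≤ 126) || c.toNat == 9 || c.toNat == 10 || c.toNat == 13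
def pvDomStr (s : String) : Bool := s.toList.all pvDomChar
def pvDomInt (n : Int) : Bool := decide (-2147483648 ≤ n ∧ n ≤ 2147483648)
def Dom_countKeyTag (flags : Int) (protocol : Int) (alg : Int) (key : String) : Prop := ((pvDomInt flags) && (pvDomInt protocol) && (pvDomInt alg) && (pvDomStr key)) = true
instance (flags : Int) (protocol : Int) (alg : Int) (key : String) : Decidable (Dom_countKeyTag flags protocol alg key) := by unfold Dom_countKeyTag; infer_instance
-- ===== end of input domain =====

-- B replaces A's per-index parity loop (even i → high byte, odd i → low byte) by a
-- two-bytes-at-a-time word loop with explicit odd-tail handling (objective: alternative).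

-- ===== PORT A =====
-- A's 'for i in range(0, len(key))' with 'key[i]' is ported as a foldl over the
-- enumerated character list (index paired with character), same state 'sum'.
def countKeyTag (flags : Int) (protocol : Int) (alg : Int) (key : String) : Int :=
  let cs := key.toList
  if alg = 1 then
    if cs.length < 4 then 0
    else ((cs[cs.length - 4]!.toNat : Int) <<< 8) + (cs[cs.length - 3]!.toNat : Int)
  else
    let s := (PySem.List.enumerate cs 0).foldl (fun s p =>
        if PySem.Int.band p.1 1 ≠ 0 then s + (p.2.toNat : Int)
        else s + ((p.2.toNat : Int) <<< 8)) (flags + (protocol <<< 8) + alg)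
    let s := s + PySem.Int.band (s >>> 16) 0xFFFF
    PySem.Int.band s 0xFFFF

-- ===== PORT B =====
-- B's 'while rest: … rest = rest[2:]' loop: structural recursion two characters at a time.
def pvWordSum : List Char → Int
  | [] => 0
  | [c] => (c.toNat : Int) <<< 8
  | c1 :: c2 :: rest => (((c1.toNat : Int) <<< 8) + (c2.toNat : Int)) + pvWordSum rest

def countKeyTag_alt (flags : Int) (protocol : Int) (alg : Int) (key : String) : Int :=
  let cs := key.toList
  if alg = 1 then
    if cs.length < 4 then 0
    else ((cs[cs.length - 4]!.toNat : Int) <<< 8) + (cs[cs.length - 3]!.toNat : Int)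
  else
    let total := flags + (protocol <<< 8) + alg + pvWordSum cs
    let total := total + PySem.Int.band (total >>> 16) 0xFFFF
    PySem.Int.band total 0xFFFF

-- ===== PRECONDITION & SPEC =====
def Spec_countKeyTag (flags : Int) (protocol : Int) (alg : Int) (key : String) (out : Int) : Prop := out = countKeyTag_alt flags protocol alg key
instance (flags : Int) (protocol : Int) (alg : Int) (key : String) (out : Int) : Decidable (Spec_countKeyTag flags protocol alg key out) := by unfold Spec_countKeyTag; infer_instance

-- ===== CLAIM (what is proved, stated in full; the proofs are below) =====
def Claim_equal_countKeyTag : Prop := ∀ (flags : Int) (protocol : Int) (alg : Int) (key : String), Dom_countKeyTag flags protocol alg key → Spec_countKeyTag flags protocol alg key (countKeyTag flags protocol alg key)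

-- ===== LEMMAS AND PROOFS =====

-- A's parity foldl, started at an even index, accumulates exactly B's word sum.
theorem pvFoldl_enumerate_eq_wordSum (cs : List Char) :
    ∀ (n : Int) (s : Int), PySem.Int.band n 1 = 0 →
      (PySem.List.enumerate cs n).foldl (fun s p =>
        if PySem.Int.band p.1 1 ≠ 0 then s + (p.2.toNat : Int)
        else s + ((p.2.toNat : Int) <<< 8)) s = s + pvWordSum cs := by
  induction cs using pvWordSum.induct with
  | case1 => intro n s _; simp [PySem.List.enumerate, pvWordSum]
  | case2 c =>
    intro n s hn
    simp [PySem.List.enumerate, pvWordSum, hn]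
  | case3 c1 c2 rest ih =>
    intro n s hn
    have hm : ∀ m : Int, PySem.Int.band m 1 = m % 2 := fun m => by
      rw [PySem.Int.band_one]; exact PySem.Int.mod_eq_emod_of_pos (by omega)
    rw [hm] at hn
    rw [PySem.List.enumerate_cons, PySem.List.enumerate_cons]
    simp only [List.foldl_cons]
    rw [if_pos (show PySem.Int.band (n + 1) 1 ≠ 0 by rw [hm]; omega),
        if_neg (show ¬(PySem.Int.band n 1 ≠ 0) by rw [hm]; omega)]
    rw [ih (n + 1 + 1) _ (by rw [hm]; omega)]
    simp only [pvWordSum]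
    ring

-- ===== VERDICT (by name: the statement is the Claim_ definition above) =====
theorem countKeyTag_spec : Claim_equal_countKeyTag := by
  intro flags protocol alg key _
  unfold Spec_countKeyTag countKeyTag countKeyTag_alt
  by_cases h : alg = 1
  · simp [h]
  · simp only [h, reduceIte]
    rw [pvFoldl_enumerate_eq_wordSum key.toList 0 _ (by decide)]
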